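-- pv_equiv track=rewrite | github.com/artronics/vajeh-content | tasks.py | parse_workspace_list
-- ===== SOURCE A (Python) =====
-- def parse_workspace_list(output):
--     workspaces = []
--     current_ws = None
--     for ws in output.split("\n"):
--         _ws = ws.strip()
--         if _ws.startswith("*"):
--             current_ws = _ws.lstrip("*").strip()
--             workspaces.append(current_ws)
--         elif _ws != "":
--             workspaces.append(_ws)
--     return workspaces, current_ws
-- ===== SOURCE B (Python) =====
-- def parse_workspace_list(output):
--     lines = [l.strip() for l in output.split("\n")]
--     workspaces = [l.lstrip("*").strip() if l.startswith("*") else l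
--                   for l in lines if l.startswith("*") or l != ""]
--     current_ws = next((l.lstrip("*").strip() for l in reversed(lines)
--                        if l.startswith("*")), None)
--     return workspaces, current_ws
-- ===== Notes on version B (the rewrite author's own statement) =====
-- stated objective: alternative
-- what changed: Replaces the single stateful loop that both builds the list and tracks the current workspace with two separately shaped passes: a comprehension over the pre-stripped lines builds the list, and a reversed scan locates the last starred line for current_ws.
import Mathlib
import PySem

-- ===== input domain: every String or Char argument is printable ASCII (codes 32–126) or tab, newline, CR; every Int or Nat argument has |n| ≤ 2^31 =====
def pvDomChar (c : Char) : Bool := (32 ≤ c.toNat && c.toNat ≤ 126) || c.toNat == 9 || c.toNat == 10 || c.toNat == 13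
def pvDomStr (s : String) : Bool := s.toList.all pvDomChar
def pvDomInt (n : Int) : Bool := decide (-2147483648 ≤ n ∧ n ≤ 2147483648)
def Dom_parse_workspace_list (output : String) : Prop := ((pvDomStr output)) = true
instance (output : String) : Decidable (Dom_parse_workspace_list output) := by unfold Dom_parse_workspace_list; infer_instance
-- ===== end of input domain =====

-- B restates A's fused stateful loop as two separate passes (a comprehension for the
-- list, a reversed-scan for current_ws); same cost, different decomposition.

-- shared helpers: exact ports of Python builtins used by both versions
-- s.lstrip("*"): drop the leading '*' characters (exact by hand; PySem has no lstrip-with-chars)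
def pvLstripStars (s : String) : String := String.ofList (s.toList.dropWhile (· == '*'))
-- output.split("\n")
def pvSplitNL (output : String) : List String := (PySem.Chars.splitOn output.toList ['\n']).map String.ofList

-- ===== PORT A =====
-- the body of A's for-loop, one step of the fold
def pvStepA (st : List String × Option String) (ws : String) : List String × Option String :=
  let _ws := PySem.Str.strip ws
  if PySem.Str.startswith _ws "*" then
    let cur := PySem.Str.strip (pvLstripStars _ws)
    (st.1 ++ [cur], some cur)
  else if _ws ≠ "" then (st.1 ++ [_ws], st.2)
  else st

def parse_workspace_list (output : String) : List String × Option String :=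
  (pvSplitNL output).foldl pvStepA ([], none)

-- ===== PORT B =====
def parse_workspace_list_alt (output : String) : List String × Option String :=
  let lines := (pvSplitNL output).map PySem.Str.strip
  let workspaces := lines.filterMap (fun l =>
    if PySem.Str.startswith l "*" || decide (l ≠ "") then
      some (if PySem.Str.startswith l "*" then PySem.Str.strip (pvLstripStars l) else l)
    else none)
  let current_ws := (lines.reverse.find? (fun l => PySem.Str.startswith l "*")).map
    (fun l => PySem.Str.strip (pvLstripStars l))
  (workspaces, current_ws)

-- ===== PRECONDITION & SPEC =====
def Spec_parse_workspace_list (output : String) (out : List String × Option String) : Prop := out = parse_workspace_list_alt output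
instance (output : String) (out : List String × Option String) : Decidable (Spec_parse_workspace_list output out) := by unfold Spec_parse_workspace_list; infer_instance

-- ===== CLAIM (what is proved, stated in full; the proofs are below) =====
def Claim_equal_parse_workspace_list : Prop := ∀ (output : String), Dom_parse_workspace_list output → Spec_parse_workspace_list output (parse_workspace_list output)

-- ===== LEMMAS AND PROOFS =====
-- the fused loop of A, abstracted over its strip/test/map functions, equals B's two passes
theorem pv_fold_abs (strip g : String → String) (p ne : String → Bool)
    (step : List String × Option String → String → List String × Option String)
    (hstep : ∀ st ws, step st ws =
      if p (strip ws) then (st.1 ++ [g (strip ws)], some (g (strip ws)))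
      else if ne (strip ws) then (st.1 ++ [strip ws], st.2) else st) :
    ∀ (ls : List String) (acc : List String) (c : Option String),
      ls.foldl step (acc, c) =
        (acc ++ (ls.map strip).filterMap (fun l =>
            if p l || ne l then some (if p l then g l else l) else none),
         ((ls.map strip).reverse.find? p).elim c (fun l => some (g l))) := by
  intro ls
  induction ls with
  | nil => intro acc c; simp
  | cons x xs ih =>
    intro acc c
    simp only [List.foldl_cons, hstep, List.map_cons, List.filterMap_cons, List.reverse_cons,
      List.find?_append]
    by_cases hp : p (strip x) = true
    · rw [if_pos hp, ih]
      cases h : (xs.map strip).reverse.find? p with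
      | none => simp [hp, List.find?, List.append_assoc]
      | some y => simp [hp, List.find?, List.append_assoc]
    · rw [if_neg hp]
      by_cases hne : ne (strip x) = true
      · rw [if_pos hne, ih]
        cases h : (xs.map strip).reverse.find? p with
        | none => simp [hp, hne, List.find?, List.append_assoc]
        | some y => simp [hp, hne, List.find?, List.append_assoc]
      · rw [if_neg hne, ih]
        cases h : (xs.map strip).reverse.find? p with
        | none => simp [hp, hne, List.find?]
        | some y => simp [hp, hne, List.find?]

theorem pv_stepA_eq (st : List String × Option String) (ws : String) :
    pvStepA st ws =
      if PySem.Str.startswith (PySem.Str.strip ws) "*" then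
        (st.1 ++ [PySem.Str.strip (pvLstripStars (PySem.Str.strip ws))],
         some (PySem.Str.strip (pvLstripStars (PySem.Str.strip ws))))
      else if decide (PySem.Str.strip ws ≠ "") then
        (st.1 ++ [PySem.Str.strip ws], st.2)
      else st := by
  unfold pvStepA
  split_ifs <;> simp_all
  exact fun hc => absurd hc (by decide)

-- ===== VERDICT (by name: the statement is the Claim_ definition above) =====
theorem parse_workspace_list_spec : Claim_equal_parse_workspace_list := by
  intro output _
  unfold Spec_parse_workspace_list parse_workspace_list parse_workspace_list_alt
  rw [pv_fold_abs PySem.Str.strip (fun l => PySem.Str.strip (pvLstripStars l))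
      (fun l => PySem.Str.startswith l "*") (fun l => decide (l ≠ "")) pvStepA pv_stepA_eq]
  cases h : ((pvSplitNL output).map PySem.Str.strip).reverse.find?
      (fun l => PySem.Str.startswith l "*") with
  | none => simp only [h, List.nil_append, Option.elim, Option.map]
  | some y => simp only [h, List.nil_append, Option.elim, Option.map]
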